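-- pv_equiv track=rewrite | github.com/koeppl/lzw-sensitivity | lzd_compress.py | lzd_compress
-- ===== SOURCE A (Python) =====
-- def format_factor(
--     f1_seq: tuple[int, ...],
--     f2_seq: tuple[int, ...],
--     label_map: dict[int, str],
-- ) -> str:
--     """Format the two sub-sequences of an LZD factor for display.
--
--     Args:
--         f1_seq:    First sub-sequence of the factor.
--         f2_seq:    Second sub-sequence of the factor (may be empty).
--         label_map: Mapping from integer symbol to its display label.
--
--     Returns:
--         A string ``"<f1>, <f2>"`` or just ``"<f1>"`` when f2 is empty.
--     """
--     left = "".join(label_map[s] for s in f1_seq)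
--     right = "".join(label_map[s] for s in f2_seq)
--     return f"{left}, {right}" if right else left
--
-- def lzd_compress(
--     symbol_sequence: list[int],
-- ) -> tuple[list[dict[str, str]], int]:
--     """Run LZD compression on an integer symbol sequence.
--
--     The dictionary is initialised with all unique input symbols.  At each
--     step the algorithm picks two consecutive longest-match phrases (f1, f2)
--     from the dictionary and records their concatenation as the new factor.
--     The concatenated phrase is then registered in the dictionary.
--
--     Args:
--         symbol_sequence: The input sequence of integer symbols.
--
--     Returns:
--         A tuple ``(factors_details, factor_count)`` where ``factors_details``
--         is a list of per-step records for display, and ``factor_count`` is the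
--         total number of LZD factors.
--     """
--     unique_symbols = sorted(set(symbol_sequence))
--     label_map: dict[int, str] = {s: f"sigma_{s}" for s in unique_symbols}
--
--     # Dictionary keyed by symbol tuples; values are human-readable labels
--     dictionary: dict[tuple[int, ...], str] = {(s,): f"sigma_{s}" for s in unique_symbols}
--
--     factors_details: list[dict[str, str]] = []
--     seq = tuple(symbol_sequence)
--     n = len(seq)
--     i = 0
--     factor_count = 0
--
--     while i < n:
--         # Step 1: find the longest dictionary match f1 starting at position i
--         f1_seq: tuple[int, ...] = ()
--         f1_lbl = ""
--         for d_seq in sorted(dictionary.keys(), key=len, reverse=True):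
--             if seq[i : i + len(d_seq)] == d_seq:
--                 f1_seq = d_seq
--                 f1_lbl = dictionary[d_seq]
--                 break
--
--         i_next = i + len(f1_seq)
--
--         # Step 2: find the longest dictionary match f2 immediately after f1
--         f2_seq: tuple[int, ...] = ()
--         f2_lbl = "-"
--         if i_next < n:
--             for d_seq in sorted(dictionary.keys(), key=len, reverse=True):
--                 if seq[i_next : i_next + len(d_seq)] == d_seq:
--                     f2_seq = d_seq
--                     f2_lbl = dictionary[d_seq]
--                     break
--
--         # Step 3: record the factor f_i = f1 · f2 and update the dictionary
--         factor_count += 1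
--         combined_seq = f1_seq + f2_seq
--         new_id = f"F_{factor_count}"
--         if combined_seq not in dictionary:
--             dictionary[combined_seq] = new_id
--
--         factors_details.append(
--             {
--                 "Step": str(factor_count),
--                 "Factor": format_factor(f1_seq, f2_seq, label_map),
--                 "G1": f1_lbl,
--                 "G2": f2_lbl,
--                 "New entry": new_id,
--             }
--         )
--
--         i += len(combined_seq)
--
--     return factors_details, factor_count
-- ===== SOURCE B (Python) =====
-- def _longest_match(seq, i, n, entries, max_len):
--     """Longest dictionary phrase starting at seq[i], probing lengths downward."""
--     for L in range(min(max_len, n - i), 0, -1):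
--         t = tuple(seq[i:i + L])
--         if t in entries:
--             return t, entries[t]
--     return (), ""
--
--
-- def lzd_compress(symbol_sequence):
--     seq = tuple(symbol_sequence)
--     n = len(seq)
--     entries = {}
--     max_len = 0
--     for s in seq:
--         if (s,) not in entries:
--             entries[(s,)] = f"sigma_{s}"
--             max_len = 1
--
--     factors_details = []
--     i = 0
--     factor_count = 0
--     while i < n:
--         f1_seq, f1_lbl = _longest_match(seq, i, n, entries, max_len)
--         j = i + len(f1_seq)
--         if j < n:
--             f2_seq, f2_lbl = _longest_match(seq, j, n, entries, max_len)
--         else: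
--             f2_seq, f2_lbl = (), "-"
--
--         factor_count += 1
--         combined = f1_seq + f2_seq
--         new_id = f"F_{factor_count}"
--         if combined not in entries:
--             entries[combined] = new_id
--         max_len = max(max_len, len(combined))
--
--         left = "".join(f"sigma_{s}" for s in f1_seq)
--         right = "".join(f"sigma_{s}" for s in f2_seq)
--         factors_details.append({
--             "Step": str(factor_count),
--             "Factor": f"{left}, {right}" if right else left,
--             "G1": f1_lbl,
--             "G2": f2_lbl,
--             "New entry": new_id,
--         })
--         i += len(combined)
--
--     return factors_details, factor_count
-- ===== Notes on version B (the rewrite author's own statement) =====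
-- stated objective: faster
-- what changed: Instead of re-sorting the whole phrase dictionary by length and scanning it at every factor (twice per step), B keeps the dictionary as a hash map plus the maximal phrase length and finds each longest match by probing slice membership from min(max_len, remaining) down to 1, which is exact because two matching phrases of equal length are the same slice.
import Mathlib
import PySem

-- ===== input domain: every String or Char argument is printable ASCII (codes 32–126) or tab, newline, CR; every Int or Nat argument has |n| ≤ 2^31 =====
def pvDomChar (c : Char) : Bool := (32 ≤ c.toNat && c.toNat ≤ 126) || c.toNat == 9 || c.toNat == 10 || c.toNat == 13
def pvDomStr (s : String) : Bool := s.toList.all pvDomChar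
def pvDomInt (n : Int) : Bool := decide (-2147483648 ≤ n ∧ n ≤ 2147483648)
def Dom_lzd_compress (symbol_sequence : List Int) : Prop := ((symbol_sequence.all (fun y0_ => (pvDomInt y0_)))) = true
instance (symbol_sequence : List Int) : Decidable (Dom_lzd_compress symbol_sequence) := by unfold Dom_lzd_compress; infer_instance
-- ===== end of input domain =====

-- B replaces A's per-step re-sort-and-scan of all dictionary phrases by downward length-indexed
-- hash-membership probes (measured faster); same return value, no observable side effects.

-- ===== PORT A =====
-- f"sigma_{s}" (shared literal helper)
def pvLabel (s : Int) : String := "sigma_" ++ PySem.Int.toStr s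

-- format_factor; label_map[s] is always present on every reachable call, ported as getD
def pvFormatFactor (f1Seq f2Seq : List Int) (labelMap : PySem.Dict Int String) : String :=
  let left := PySem.Str.join "" (f1Seq.map (fun s => labelMap.getD s ""))
  let right := PySem.Str.join "" (f2Seq.map (fun s => labelMap.getD s ""))
  if right = "" then left else left ++ ", " ++ right

-- 'for d_seq in sorted(dictionary.keys(), key=len, reverse=True): if seq[i:i+len(d_seq)] == d_seq: … break'
def pvFindLongestA (dict : PySem.Dict (List Int) String) (seq : List Int) (i : Int) :
    Option (List Int) :=
  (PySem.List.sorted dict.keys (fun k => k.length) true).find?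
    (fun dSeq => PySem.List.slice seq (some i) (some (i + (dSeq.length : Int))) == dSeq)

-- the while loop of A; fuel = len(seq) bounds the iteration count (i advances each round)
def lzdLoopA (seq : List Int) (labelMap : PySem.Dict Int String) :
    Nat → Int → PySem.Dict (List Int) String → List (List (String × String)) → Int →
    (List (List (String × String))) × Int
  | 0, _, _, acc, c => (acc, c)
  | fuel + 1, i, dict, acc, c =>
      if i < PySem.List.len seq then
        let f1 : List Int × String :=
          match pvFindLongestA dict seq i with
          | some dSeq => (dSeq, dict.getD dSeq "")
          | none => ([], "")
        let iNext : Int := i + (f1.1.length : Int)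
        let f2 : List Int × String :=
          if iNext < PySem.List.len seq then
            match pvFindLongestA dict seq iNext with
            | some dSeq => (dSeq, dict.getD dSeq "")
            | none => ([], "-")
          else ([], "-")
        let factorCount := c + 1
        let combined := f1.1 ++ f2.1
        let newId := "F_" ++ PySem.Int.toStr factorCount
        let dict' := if dict.contains combined then dict else dict.insert combined newId
        let record := [("Step", PySem.Int.toStr factorCount),
                       ("Factor", pvFormatFactor f1.1 f2.1 labelMap),
                       ("G1", f1.2), ("G2", f2.2), ("New entry", newId)]
        lzdLoopA seq labelMap fuel (i + (combined.length : Int)) dict' (acc ++ [record]) factorCount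
      else (acc, c)

def lzd_compress (symbol_sequence : List Int) : (List (List (String × String))) × Int :=
  let uniqueSymbols := PySem.List.sorted (PySem.Set.ofList symbol_sequence) (fun x => x) false
  let labelMap : PySem.Dict Int String :=
    uniqueSymbols.foldl (fun d s => d.insert s (pvLabel s)) PySem.Dict.empty
  let dictionary : PySem.Dict (List Int) String :=
    uniqueSymbols.foldl (fun d s => d.insert [s] (pvLabel s)) PySem.Dict.empty
  lzdLoopA symbol_sequence labelMap symbol_sequence.length 0 dictionary [] 0

-- ===== PORT B =====
-- _longest_match: probe lengths min(max_len, n-i) .. 1 downward, first hit wins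
def pvLongestMatch (seq : List Int) (i n : Int) (entries : PySem.Dict (List Int) String)
    (maxLen : Int) : List Int × String :=
  match (PySem.List.pyRange (min maxLen (n - i)) 0 (-1)).find?
      (fun L => entries.contains (PySem.List.slice seq (some i) (some (i + L)))) with
  | some L =>
      let t := PySem.List.slice seq (some i) (some (i + L))
      (t, entries.getD t "")
  | none => ([], "")

-- the while loop of B; state carries (entries, max_len); fuel = len(seq)
def lzdLoopB (seq : List Int) :
    Nat → Int → PySem.Dict (List Int) String → Int → List (List (String × String)) → Int →
    (List (List (String × String))) × Int
  | 0, _, _, _, acc, c => (acc, c)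
  | fuel + 1, i, entries, maxLen, acc, c =>
      if i < PySem.List.len seq then
        let f1 := pvLongestMatch seq i (PySem.List.len seq) entries maxLen
        let j : Int := i + (f1.1.length : Int)
        let f2 := if j < PySem.List.len seq then
                    pvLongestMatch seq j (PySem.List.len seq) entries maxLen
                  else ([], "-")
        let factorCount := c + 1
        let combined := f1.1 ++ f2.1
        let newId := "F_" ++ PySem.Int.toStr factorCount
        let entries' := if entries.contains combined then entries
                        else entries.insert combined newId
        let maxLen' := max maxLen (combined.length : Int)
        let left := PySem.Str.join "" (f1.1.map pvLabel)
        let right := PySem.Str.join "" (f2.1.map pvLabel)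
        let record := [("Step", PySem.Int.toStr factorCount),
                       ("Factor", if right = "" then left else left ++ ", " ++ right),
                       ("G1", f1.2), ("G2", f2.2), ("New entry", newId)]
        lzdLoopB seq fuel (i + (combined.length : Int)) entries' maxLen' (acc ++ [record])
          factorCount
      else (acc, c)

def lzd_compress_alt (symbol_sequence : List Int) : (List (List (String × String))) × Int :=
  let init := symbol_sequence.foldl
    (fun (p : PySem.Dict (List Int) String × Int) s =>
      if p.1.contains [s] then p else (p.1.insert [s] (pvLabel s), 1))
    (PySem.Dict.empty, 0)
  lzdLoopB symbol_sequence symbol_sequence.length 0 init.1 init.2 [] 0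

-- ===== PRECONDITION & SPEC =====
def Spec_lzd_compress (symbol_sequence : List Int) (out : (List (List (String × String))) × Int) : Prop := out = lzd_compress_alt symbol_sequence
instance (symbol_sequence : List Int) (out : (List (List (String × String))) × Int) : Decidable (Spec_lzd_compress symbol_sequence out) := by unfold Spec_lzd_compress; infer_instance

-- ===== CLAIM (what is proved, stated in full; the proofs are below) =====
def Claim_equal_lzd_compress : Prop := ∀ (symbol_sequence : List Int), Dom_lzd_compress symbol_sequence → Spec_lzd_compress symbol_sequence (lzd_compress symbol_sequence)

-- ===== LEMMAS AND PROOFS =====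

lemma pv_slice_singleton (seq : List Int) (i : Int) (hi : 0 ≤ i) (h : i.toNat < seq.length) :
    PySem.List.slice seq (some i) (some (i + 1)) = [seq[i.toNat]] := by
  rw [PySem.List.slice_toNat seq hi (by omega)]
  rw [show (i + 1).toNat - i.toNat = 1 from by omega, List.drop_eq_getElem_cons h,
    List.take_succ_cons, List.take_zero]

lemma pv_slice_len_of_le (seq : List Int) (i L : Int) (hi : 0 ≤ i) (hL : 0 ≤ L)
    (h : i + L ≤ (seq.length : Int)) :
    (PySem.List.slice seq (some i) (some (i + L))).length = L.toNat := by
  rw [PySem.List.slice_toNat seq hi (by omega)]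
  simp only [List.length_take, List.length_drop]
  omega

lemma pv_match_shape (seq : List Int) (i : Int) (k : List Int) (hi : 0 ≤ i)
    (hin : i < (seq.length : Int))
    (h : PySem.List.slice seq (some i) (some (i + (k.length : Int))) = k) :
    i + (k.length : Int) ≤ (seq.length : Int) := by
  have hl := congrArg List.length h
  rw [PySem.List.slice_toNat seq hi (by omega)] at hl
  simp only [List.length_take, List.length_drop] at hl
  omega

lemma pv_find_countdown (q : Int → Bool) (T : Int) (hT1 : 1 ≤ T) (hq : q T = true) :
    ∀ (k : Nat) (m : Int), T ≤ m → (∀ L, T < L → L ≤ m → q L = false) →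
      (m - T).toNat = k → (PySem.List.pyRange m 0 (-1)).find? q = some T := by
  intro k
  induction k with
  | zero =>
      intro m hTm hab h0
      have hm : m = T := by omega
      subst hm
      rw [PySem.List.pyRange_neg_one_cons (by omega)]
      exact List.find?_cons_of_pos hq
  | succ k ih =>
      intro m hTm hab hk
      have hmT : T < m := by omega
      rw [PySem.List.pyRange_neg_one_cons (by omega : (0:Int) < m)]
      rw [List.find?_cons_of_neg (by rw [hab m hmT le_rfl]; simp)]
      exact ih (m - 1) (by omega) (fun L h1 h2 => hab L h1 (by omega)) (by omega)

lemma pv_match_eq (seq : List Int) (d e : PySem.Dict (List Int) String) (m i : Int)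
    (hsame : ∀ k, d.get? k = e.get? k)
    (hkey : ∀ k ∈ e.keys, 1 ≤ k.length ∧ (k.length : Int) ≤ m)
    (hsing : ∀ s ∈ seq, e.contains [s] = true)
    (hi : 0 ≤ i) (hin : i < (seq.length : Int)) :
    ∃ t : List Int,
      pvFindLongestA d seq i = some t ∧
      pvLongestMatch seq i (PySem.List.len seq) e m = (t, e.getD t "") ∧
      1 ≤ t.length ∧ (∀ s ∈ t, s ∈ seq) := by
  have hcont : ∀ k, d.contains k = e.contains k := by
    intro k
    rw [PySem.Dict.contains_eq_isSome_get?, PySem.Dict.contains_eq_isSome_get?, hsame]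
  have ha : i.toNat < seq.length := by omega
  have hx : e.contains [seq[i.toNat]] = true := hsing _ (List.getElem_mem ha)
  have hdx : d.contains [seq[i.toNat]] = true := by rw [hcont]; exact hx
  have hmem : [seq[i.toNat]] ∈ PySem.List.sorted d.keys (fun k => k.length) true :=
    (PySem.List.mem_sorted _ _ _ _).mpr ((PySem.Dict.contains_iff_mem_keys d _).mp hdx)
  have hp1 : (PySem.List.slice seq (some i)
      (some (i + (([seq[i.toNat]] : List Int).length : Int))) == [seq[i.toNat]]) = true := by
    simp [pv_slice_singleton seq i hi ha]
  have hfind : ∃ t, pvFindLongestA d seq i = some t := by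
    have h1 := List.find?_isSome
      (xs := PySem.List.sorted d.keys (fun k => k.length) true)
      (p := fun dSeq => PySem.List.slice seq (some i) (some (i + (dSeq.length : Int))) == dSeq)
    rw [Option.isSome_iff_exists] at h1
    exact h1.mpr ⟨_, hmem, hp1⟩
  obtain ⟨t, ht⟩ := hfind
  have htdec := ht
  rw [pvFindLongestA, List.find?_eq_some_iff_append] at htdec
  obtain ⟨hpt, as, bs, heq, hbefore⟩ := htdec
  have hslice_t : PySem.List.slice seq (some i) (some (i + (t.length : Int))) = t := by
    simpa using hpt
  have htn : i + (t.length : Int) ≤ (seq.length : Int) := pv_match_shape seq i t hi hin hslice_t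
  have htmemd : t ∈ d.keys := by
    have h2 : t ∈ PySem.List.sorted d.keys (fun k => k.length) true := by
      rw [heq]; exact List.mem_append_right _ (List.mem_cons_self)
    exact (PySem.List.mem_sorted _ _ _ _).mp h2
  have hte : e.contains t = true := by
    rw [← hcont]; exact (PySem.Dict.contains_iff_mem_keys d t).mpr htmemd
  obtain ⟨ht1, htm⟩ := hkey t ((PySem.Dict.contains_iff_mem_keys e t).mp hte)
  -- maximality: no strictly longer phrase matches at i
  have hmax : ∀ L : Int, (t.length : Int) < L → L ≤ min m ((seq.length : Int) - i) →
      e.contains (PySem.List.slice seq (some i) (some (i + L))) = false := by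
    intro L hL hLm
    by_contra hcon
    rw [Bool.not_eq_false] at hcon
    set k' := PySem.List.slice seq (some i) (some (i + L)) with hk'
    have hLpos : 0 ≤ L := by omega
    have hiL : i + L ≤ (seq.length : Int) := by omega
    have hk'len : k'.length = L.toNat := pv_slice_len_of_le seq i L hi hLpos hiL
    have hpk' : (PySem.List.slice seq (some i) (some (i + (k'.length : Int))) == k') = true := by
      rw [hk'len, show ((L.toNat : Nat) : Int) = L from by omega]
      rw [hk']
      simp
    have hk'mem : k' ∈ PySem.List.sorted d.keys (fun k => k.length) true :=
      (PySem.List.mem_sorted _ _ _ _).mpr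
        ((PySem.Dict.contains_iff_mem_keys d k').mp (by rw [hcont]; exact hcon))
    rw [heq] at hk'mem
    rcases List.mem_append.mp hk'mem with hmas | hmts
    · have h3 := hbefore k' hmas
      rw [hpk'] at h3
      simp at h3
    · rcases List.mem_cons.mp hmts with hkt | hmbs
      · rw [hkt] at hk'len; omega
      · have hpw := PySem.List.sorted_pairwise_rev d.keys (fun k => k.length)
        rw [heq] at hpw
        have hpw2 := (List.pairwise_append.mp hpw).2.1
        rw [List.pairwise_cons] at hpw2
        have h4 := hpw2.1 k' hmbs
        simp only at h4
        omega
  have hq : (fun L => e.contains (PySem.List.slice seq (some i) (some (i + L))))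
      ((t.length : Int)) = true := by
    simp only [hslice_t]; exact hte
  have hfound := pv_find_countdown
    (fun L => e.contains (PySem.List.slice seq (some i) (some (i + L))))
    ((t.length : Int)) (by exact_mod_cast ht1) hq
    ((min m ((seq.length : Int) - i) - (t.length : Int)).toNat)
    (min m ((seq.length : Int) - i)) (by omega)
    (fun L h1 h2 => hmax L h1 h2) rfl
  refine ⟨t, ht, ?_, ht1, ?_⟩
  · rw [pvLongestMatch]
    simp only [PySem.List.len_eq]
    rw [hfound]
    simp only [hslice_t]
  · intro s hs
    rw [← hslice_t] at hs
    exact PySem.List.mem_of_mem_slice seq _ _ hs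

lemma pv_foldLbl_get? (l : List Int) (d : PySem.Dict Int String) (x : Int) :
    (l.foldl (fun d s => d.insert s (pvLabel s)) d).get? x =
      if x ∈ l then some (pvLabel x) else d.get? x := by
  induction l generalizing d with
  | nil => simp
  | cons s l ih =>
      rw [List.foldl_cons, ih]
      by_cases hx : x = s
      · subst hx
        by_cases hxl : x ∈ l <;> simp [hxl, PySem.Dict.get?_insert_self]
      · rw [PySem.Dict.get?_insert_of_ne d (pvLabel s) hx]
        simp [List.mem_cons, hx]

lemma pv_foldG_get? (l : List Int) (d : PySem.Dict (List Int) String) (x : List Int) :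
    (l.foldl (fun d s => d.insert [s] (pvLabel s)) d).get? x =
      (match x with
       | [s] => if s ∈ l then some (pvLabel s) else d.get? x
       | _ => d.get? x) := by
  induction l generalizing d with
  | nil =>
      rcases x with _ | ⟨s, _ | ⟨s2, r⟩⟩ <;> simp
  | cons s0 l ih =>
      rw [List.foldl_cons, ih]
      rcases x with _ | ⟨s, _ | ⟨s2, r⟩⟩
      · have hne : ([] : List Int) ≠ [s0] := by simp
        simp [PySem.Dict.get?_insert_of_ne d (pvLabel s0) hne]
      · by_cases hx : s = s0
        · subst hx
          by_cases hxl : s ∈ l <;> simp [hxl, PySem.Dict.get?_insert_self]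
        · have hne : ([s] : List Int) ≠ [s0] := by simpa using hx
          rw [PySem.Dict.get?_insert_of_ne d (pvLabel s0) hne]
          simp [List.mem_cons, hx]
      · have hne : (s :: s2 :: r : List Int) ≠ [s0] := by simp
        simp [PySem.Dict.get?_insert_of_ne d (pvLabel s0) hne]

lemma pv_foldH_get? (l : List Int) (p : PySem.Dict (List Int) String × Int) (x : List Int) :
    ((l.foldl
        (fun (p : PySem.Dict (List Int) String × Int) s =>
          if p.1.contains [s] then p else (p.1.insert [s] (pvLabel s), 1)) p).1).get? x =
      (match x with
       | [s] => if s ∈ l then some ((p.1.get? [s]).getD (pvLabel s)) else p.1.get? x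
       | _ => p.1.get? x) := by
  induction l generalizing p with
  | nil =>
      rcases x with _ | ⟨s, _ | ⟨s2, r⟩⟩ <;> simp
  | cons s0 l ih =>
      rw [List.foldl_cons]
      by_cases hc : p.1.contains [s0]
      · rw [if_pos hc, ih]
        have hvs : (p.1.get? [s0]).isSome = true := by
          rw [← PySem.Dict.contains_eq_isSome_get?]; exact hc
        obtain ⟨v, hv⟩ := Option.isSome_iff_exists.mp hvs
        rcases x with _ | ⟨s, _ | ⟨s2, r⟩⟩
        · rfl
        · by_cases hx : s = s0
          · subst hx
            by_cases hxl : s ∈ l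
            · simp [hxl]
            · simp [hxl, hv]
          · simp [List.mem_cons, hx]
        · rfl
      · rw [if_neg hc, ih]
        have hnone : p.1.get? [s0] = none := by
          rw [PySem.Dict.contains_eq_isSome_get?] at hc
          simpa using hc
        rcases x with _ | ⟨s, _ | ⟨s2, r⟩⟩
        · have hne : ([] : List Int) ≠ [s0] := by simp
          simp [PySem.Dict.get?_insert_of_ne p.1 (pvLabel s0) hne]
        · by_cases hx : s = s0
          · subst hx
            by_cases hxl : s ∈ l <;>
              simp [hxl, PySem.Dict.get?_insert_self, hnone]
          · have hne : ([s] : List Int) ≠ [s0] := by simpa using hx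
            simp [List.mem_cons, hx, PySem.Dict.get?_insert_of_ne p.1 (pvLabel s0) hne]
        · have hne : (s :: s2 :: r : List Int) ≠ [s0] := by simp
          simp [PySem.Dict.get?_insert_of_ne p.1 (pvLabel s0) hne]

lemma pv_foldH_inv (l : List Int) (p : PySem.Dict (List Int) String × Int)
    (hp : ∀ k ∈ p.1.keys, k.length = 1 ∧ (1 : Int) ≤ p.2) :
    ∀ k ∈ (l.foldl
        (fun (p : PySem.Dict (List Int) String × Int) s =>
          if p.1.contains [s] then p else (p.1.insert [s] (pvLabel s), 1)) p).1.keys,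
      k.length = 1 ∧
        (1 : Int) ≤ (l.foldl
          (fun (p : PySem.Dict (List Int) String × Int) s =>
            if p.1.contains [s] then p else (p.1.insert [s] (pvLabel s), 1)) p).2 := by
  induction l generalizing p with
  | nil => exact hp
  | cons s0 l ih =>
      rw [List.foldl_cons]
      by_cases hc : p.1.contains [s0]
      · rw [if_pos hc]; exact ih p hp
      · rw [if_neg hc]
        refine ih _ ?_
        intro k hk
        simp only [PySem.Dict.keys_insert_of_not_contains p.1 _ (by simpa using hc)] at hk
        rcases List.mem_append.mp hk with hk | hk
        · exact ⟨(hp k hk).1, by norm_num⟩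
        · simp only [List.mem_singleton] at hk
          subst hk
          exact ⟨rfl, by norm_num⟩

lemma pv_loop_eq (seq : List Int) (labelMap : PySem.Dict Int String) (fuel : Nat) :
    ∀ (i : Int) (d e : PySem.Dict (List Int) String) (m : Int)
      (acc : List (List (String × String))) (c : Int),
      0 ≤ i →
      (∀ k, d.get? k = e.get? k) →
      (∀ k ∈ e.keys, 1 ≤ k.length ∧ (k.length : Int) ≤ m) →
      (∀ s ∈ seq, e.contains [s] = true) →
      (∀ s ∈ seq, labelMap.getD s "" = pvLabel s) →
      lzdLoopA seq labelMap fuel i d acc c = lzdLoopB seq fuel i e m acc c := by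
  induction fuel with
  | zero => intro i d e m acc c _ _ _ _ _; rfl
  | succ fuel ih =>
      intro i d e m acc c hi hsame hkey hsing hlbl
      have hcont : ∀ k, d.contains k = e.contains k := by
        intro k
        rw [PySem.Dict.contains_eq_isSome_get?, PySem.Dict.contains_eq_isSome_get?, hsame]
      have hgetD : ∀ k, d.getD k "" = e.getD k "" := by
        intro k
        rw [PySem.Dict.getD_eq_get?_getD, PySem.Dict.getD_eq_get?_getD, hsame]
      by_cases hin : i < PySem.List.len seq
      · have hin' : i < (seq.length : Int) := by simpa using hin
        obtain ⟨t, htA, htB, ht1, htsub⟩ := pv_match_eq seq d e m i hsame hkey hsing hi hin'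
        simp only [lzdLoopA, lzdLoopB, if_pos hin, htA, htB, hgetD t]
        set j := i + (t.length : Int) with hj
        have hj0 : 0 ≤ j := by omega
        by_cases hjn : j < PySem.List.len seq
        · have hjn' : j < (seq.length : Int) := by simpa using hjn
          obtain ⟨u, huA, huB, hu1, husub⟩ := pv_match_eq seq d e m j hsame hkey hsing hj0 hjn'
          simp only [if_pos hjn, huA, huB, hgetD u]
          have hfac : pvFormatFactor t u labelMap =
              (if PySem.Str.join "" (u.map pvLabel) = "" then
                  PySem.Str.join "" (t.map pvLabel)
               else PySem.Str.join "" (t.map pvLabel) ++ ", " ++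
                  PySem.Str.join "" (u.map pvLabel)) := by
            rw [pvFormatFactor]
            rw [List.map_congr_left (fun s hs => hlbl s (htsub s hs)),
                List.map_congr_left (fun s hs => hlbl s (husub s hs))]
          rw [hfac, hcont (t ++ u)]
          by_cases hcomb : e.contains (t ++ u)
          · rw [if_pos hcomb, if_pos hcomb]
            apply ih
            · omega
            · exact hsame
            · exact fun k hk => ⟨(hkey k hk).1, le_trans (hkey k hk).2 (le_max_left _ _)⟩
            · exact hsing
            · exact hlbl
          · rw [if_neg hcomb, if_neg hcomb]
            apply ih
            · omega
            · intro k
              by_cases hk : k = t ++ u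
              · subst hk; rw [PySem.Dict.get?_insert_self, PySem.Dict.get?_insert_self]
              · rw [PySem.Dict.get?_insert_of_ne _ _ hk, PySem.Dict.get?_insert_of_ne _ _ hk,
                  hsame]
            · intro k hk
              rw [PySem.Dict.keys_insert_of_not_contains e _ (by simpa using hcomb)] at hk
              rcases List.mem_append.mp hk with hk | hk
              · exact ⟨(hkey k hk).1, le_trans (hkey k hk).2 (le_max_left _ _)⟩
              · simp only [List.mem_singleton] at hk
                subst hk
                refine ⟨?_, le_max_right _ _⟩
                simp only [List.length_append]
                omega
            · intro s hs
              rw [PySem.Dict.contains_insert, hsing s hs]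
              simp
            · exact hlbl
        · simp only [if_neg hjn]
          have hfac : pvFormatFactor t [] labelMap =
              (if PySem.Str.join "" (([] : List Int).map pvLabel) = "" then
                  PySem.Str.join "" (t.map pvLabel)
               else PySem.Str.join "" (t.map pvLabel) ++ ", " ++
                  PySem.Str.join "" (([] : List Int).map pvLabel)) := by
            rw [pvFormatFactor]
            rw [List.map_congr_left (fun s hs => hlbl s (htsub s hs))]
            simp
          rw [hfac, hcont (t ++ [])]
          by_cases hcomb : e.contains (t ++ [])
          · rw [if_pos hcomb, if_pos hcomb]
            apply ih
            · omega
            · exact hsame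
            · exact fun k hk => ⟨(hkey k hk).1, le_trans (hkey k hk).2 (le_max_left _ _)⟩
            · exact hsing
            · exact hlbl
          · rw [if_neg hcomb, if_neg hcomb]
            apply ih
            · omega
            · intro k
              by_cases hk : k = t ++ []
              · subst hk; rw [PySem.Dict.get?_insert_self, PySem.Dict.get?_insert_self]
              · rw [PySem.Dict.get?_insert_of_ne _ _ hk, PySem.Dict.get?_insert_of_ne _ _ hk,
                  hsame]
            · intro k hk
              rw [PySem.Dict.keys_insert_of_not_contains e _ (by simpa using hcomb)] at hk
              rcases List.mem_append.mp hk with hk | hk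
              · exact ⟨(hkey k hk).1, le_trans (hkey k hk).2 (le_max_left _ _)⟩
              · simp only [List.mem_singleton] at hk
                subst hk
                refine ⟨?_, le_max_right _ _⟩
                simp only [List.length_append]
                omega
            · intro s hs
              rw [PySem.Dict.contains_insert, hsing s hs]
              simp
            · exact hlbl
      · simp only [lzdLoopA, lzdLoopB, if_neg hin]

-- ===== VERDICT (by name: the statement is the Claim_ definition above) =====
theorem lzd_compress_spec : Claim_equal_lzd_compress := by
  intro seq _
  unfold Spec_lzd_compress lzd_compress lzd_compress_alt
  have hmemu : ∀ s : Int,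
      (s ∈ PySem.List.sorted (PySem.Set.ofList seq) (fun x => x) false) ↔ s ∈ seq := by
    intro s
    rw [PySem.List.mem_sorted, PySem.Set.mem_ofList]
  apply pv_loop_eq seq _ seq.length 0 _ _ _ [] 0 le_rfl
  · intro k
    rw [pv_foldG_get?, pv_foldH_get?]
    rcases k with _ | ⟨s, _ | ⟨s2, r⟩⟩
    · rfl
    · show (if s ∈ PySem.List.sorted (PySem.Set.ofList seq) (fun x => x) false then
            some (pvLabel s)
          else (PySem.Dict.empty : PySem.Dict (List Int) String).get? [s]) =
        (if s ∈ seq then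
            some (((PySem.Dict.empty : PySem.Dict (List Int) String).get? [s]).getD (pvLabel s))
          else (PySem.Dict.empty : PySem.Dict (List Int) String).get? [s])
      by_cases hs : s ∈ seq
      · rw [if_pos ((hmemu s).mpr hs), if_pos hs, PySem.Dict.get?_empty]
        rfl
      · rw [if_neg (fun h => hs ((hmemu s).mp h)), if_neg hs]
    · rfl
  · intro k hk
    have hkeys0 : ∀ (k : List Int),
        k ∈ (PySem.Dict.empty : PySem.Dict (List Int) String).keys → False := by
      intro k hk
      rw [show (PySem.Dict.empty : PySem.Dict (List Int) String).keys = [] from rfl] at hk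
      cases hk
    have h5 := pv_foldH_inv seq (PySem.Dict.empty, 0)
      (fun k hk => absurd hk (hkeys0 k)) k hk
    exact ⟨le_of_eq h5.1.symm, by rw [h5.1]; exact_mod_cast h5.2⟩
  · intro s hs
    rw [PySem.Dict.contains_eq_isSome_get?, pv_foldH_get?]
    show (if s ∈ seq then
        some (((PySem.Dict.empty : PySem.Dict (List Int) String).get? [s]).getD (pvLabel s))
      else (PySem.Dict.empty : PySem.Dict (List Int) String).get? [s]).isSome = true
    rw [if_pos hs]
    rfl
  · intro s hs
    rw [PySem.Dict.getD_eq_get?_getD, pv_foldLbl_get?, if_pos ((hmemu s).mpr hs)]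
    rfl
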